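-- pv_equiv track=rewrite | github.com/osososvos/TFB_PII_V1 | main.py | redact_text
-- ===== SOURCE A (Python) =====
-- def redact_text(text, pii_entities):
--     redacted_text = text
--     offset = 0
--     for start, end, label in pii_entities:
--         replacement_text = f"[{label}]"
--         redacted_text = redacted_text[:start + offset] + replacement_text + redacted_text[end + offset:]
--         offset += len(replacement_text) - (end - start)
--     return redacted_text
-- ===== SOURCE B (Python) =====
-- def _bound(i, n):
--     """Normalize a slice bound over a sequence of length n, as str slicing does."""
--     if i < 0:
--         i += n
--     return min(max(i, 0), n)
--
--
-- def _split(pieces, k):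
--     """Split a list of (s, lo, hi) views at character position k: (head, tail)."""
--     head, tail = [], list(pieces)
--     while k > 0:
--         s, lo, hi = tail[0]
--         if hi - lo <= k:
--             head.append(tail.pop(0))
--             k -= hi - lo
--         else:
--             head.append((s, lo, lo + k))
--             tail[0] = (s, lo + k, hi)
--             k = 0
--     return head, tail
--
--
-- def redact_text(text, pii_entities):
--     # Piece table: the working string is a list of (s, lo, hi) views into the
--     # input text and the labels; each entity splices a label view in, and the
--     # string is materialized once by the final join.
--     pieces = [(text, 0, len(text))]
--     total = len(text)
--     offset = 0
--     for start, end, label in pii_entities: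
--         repl = f"[{label}]"
--         a = _bound(start + offset, total)
--         b = _bound(end + offset, total)
--         head, _ = _split(pieces, a)
--         _, tail = _split(pieces, b)
--         pieces = head + [(repl, 0, len(repl))] + tail
--         total = a + len(repl) + (total - b)
--         offset += len(repl) - (end - start)
--     return "".join(s[lo:hi] for s, lo, hi in pieces)
-- ===== Notes on version B (the rewrite author's own statement) =====
-- stated objective: alternative
-- what changed: B keeps the working string as a piece table of (string, lo, hi) views and splices each label in by splitting the piece list at the two bound positions, materializing the string once with a final join, instead of A's re-concatenation of the entire string for every entity.
import Mathlib
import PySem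

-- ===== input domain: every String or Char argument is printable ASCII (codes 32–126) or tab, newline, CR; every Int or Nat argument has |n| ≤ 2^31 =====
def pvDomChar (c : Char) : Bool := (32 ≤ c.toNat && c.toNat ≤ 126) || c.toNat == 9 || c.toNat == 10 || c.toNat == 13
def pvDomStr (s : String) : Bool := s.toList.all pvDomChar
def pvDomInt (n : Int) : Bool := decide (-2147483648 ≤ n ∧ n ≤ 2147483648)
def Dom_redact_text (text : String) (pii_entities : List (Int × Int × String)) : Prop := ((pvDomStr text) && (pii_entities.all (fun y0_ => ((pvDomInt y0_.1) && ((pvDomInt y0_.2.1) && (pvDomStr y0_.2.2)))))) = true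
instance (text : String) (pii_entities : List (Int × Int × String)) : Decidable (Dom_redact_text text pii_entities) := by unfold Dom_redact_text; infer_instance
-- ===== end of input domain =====

-- ===== PORT A =====
-- B replaces A's whole-string re-concatenation per entity with a piece table of
-- (string, lo, hi) views spliced per entity and joined once at the end (objective: alternative).

-- A's loop body: redacted = redacted[:start+offset] + "[label]" + redacted[end+offset:];
--                offset += len(repl) - (end - start)
def stepA (st : List Char × Int) (ent : Int × Int × String) : List Char × Int :=
  let repl : List Char := '[' :: ent.2.2.toList ++ [']']
  (PySem.List.slice st.1 none (some (ent.1 + st.2)) ++ repl ++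
     PySem.List.slice st.1 (some (ent.2.1 + st.2)) none,
   st.2 + (repl.length : Int) - (ent.2.1 - ent.1))

def redact_text (text : String) (pii_entities : List (Int × Int × String)) : String :=
  String.ofList (pii_entities.foldl stepA (text.toList, 0)).1

-- ===== PORT B =====
-- a piece is a view (s, lo, hi) into some string
abbrev PieceB := List Char × Nat × Nat

-- _bound(i, n): if i < 0: i += n; return min(max(i, 0), n)
def boundB (i : Int) (n : Nat) : Nat :=
  (min (max (if i < 0 then i + n else i) 0) (n : Int)).toNat

-- _split(pieces, k): the while loop moving pieces (splitting the last one) into head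
def splitB (pieces : List PieceB) (k : Nat) : List PieceB × List PieceB :=
  if k = 0 then ([], pieces)
  else
    match pieces with
    | [] => ([], [])   -- unreachable: every call has k ≤ total length (Python would raise)
    | (s, lo, hi) :: rest =>
        if hi - lo ≤ k then
          let r := splitB rest (k - (hi - lo))
          ((s, lo, hi) :: r.1, r.2)
        else
          ([(s, lo, lo + k)], (s, lo + k, hi) :: rest)
termination_by pieces.length

-- B's loop body over the state (pieces, total, offset)
def stepB (st : List PieceB × Nat × Int) (ent : Int × Int × String) :
    List PieceB × Nat × Int :=
  let repl : List Char := '[' :: ent.2.2.toList ++ [']']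
  let a := boundB (ent.1 + st.2.2) st.2.1
  let b := boundB (ent.2.1 + st.2.2) st.2.1
  ((splitB st.1 a).1 ++ (repl, 0, repl.length) :: (splitB st.1 b).2,
   a + repl.length + (st.2.1 - b),
   st.2.2 + (repl.length : Int) - (ent.2.1 - ent.1))

-- s[lo:hi] in the final join
def pieceSlice (p : PieceB) : List Char :=
  PySem.List.slice p.1 (some (p.2.1 : Int)) (some (p.2.2 : Int))

def redact_text_alt (text : String) (pii_entities : List (Int × Int × String)) : String :=
  let st := pii_entities.foldl stepB ([(text.toList, 0, text.toList.length)], text.toList.length, 0)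
  String.ofList (st.1.map pieceSlice).flatten

-- ===== PRECONDITION & SPEC =====
def Spec_redact_text (text : String) (pii_entities : List (Int × Int × String)) (out : String) : Prop := out = redact_text_alt text pii_entities
instance (text : String) (pii_entities : List (Int × Int × String)) (out : String) : Decidable (Spec_redact_text text pii_entities out) := by unfold Spec_redact_text; infer_instance

-- ===== CLAIM (what is proved, stated in full; the proofs are below) =====
def Claim_equal_redact_text : Prop := ∀ (text : String) (pii_entities : List (Int × Int × String)), Dom_redact_text text pii_entities → Spec_redact_text text pii_entities (redact_text text pii_entities)

-- ===== LEMMAS AND PROOFS =====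

-- a well-formed view: lo ≤ hi ≤ len s (every piece B builds satisfies it)
def GoodP (p : PieceB) : Prop := p.2.1 ≤ p.2.2 ∧ p.2.2 ≤ p.1.length

-- the characters a piece denotes
def pieceStr (p : PieceB) : List Char := (p.1.drop p.2.1).take (p.2.2 - p.2.1)

-- the characters a piece list denotes, in order
def flatP (L : List PieceB) : List Char := (L.map pieceStr).flatten

theorem pieceSlice_eq (p : PieceB) : pieceSlice p = pieceStr p := by
  simp [pieceSlice, pieceStr, PySem.List.slice_natCast]

theorem len_pieceStr (p : PieceB) (h : GoodP p) : (pieceStr p).length = p.2.2 - p.2.1 := by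
  obtain ⟨-, h2⟩ := h
  simp [pieceStr]
  omega

theorem flatP_nil : flatP [] = [] := by simp [flatP]

theorem flatP_cons (p : PieceB) (L : List PieceB) : flatP (p :: L) = pieceStr p ++ flatP L := by
  simp [flatP]

theorem flatP_append (L M : List PieceB) : flatP (L ++ M) = flatP L ++ flatP M := by
  simp [flatP]

theorem boundB_eq_clampIdx (i : Int) (n : Nat) : boundB i n = PySem.List.clampIdx n i := by
  simp only [boundB, PySem.List.clampIdx]
  split_ifs <;> omega

theorem boundB_le (i : Int) (n : Nat) : boundB i n ≤ n := by
  simp only [boundB]; split_ifs <;> omega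

theorem slice_none_some (xs : List Char) (b : Int) :
    PySem.List.slice xs none (some b) = xs.take (PySem.List.clampIdx xs.length b) := by
  simp [PySem.List.slice]

theorem pieceStr_dropLow (s : List Char) (lo hi d : Nat) :
    pieceStr (s, lo + d, hi) = (pieceStr (s, lo, hi)).drop d := by
  simp only [pieceStr]
  rw [List.drop_take, List.drop_drop]
  congr 1
  omega

theorem splitB_spec (pieces : List PieceB) (k : Nat)
    (hG : ∀ p ∈ pieces, GoodP p) (hk : k ≤ (flatP pieces).length) :
    flatP (splitB pieces k).1 = (flatP pieces).take k ∧
    flatP (splitB pieces k).2 = (flatP pieces).drop k ∧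
    (∀ p ∈ (splitB pieces k).1, GoodP p) ∧
    (∀ p ∈ (splitB pieces k).2, GoodP p) := by
  revert hG hk
  fun_induction splitB pieces k with
  | case1 pieces =>
      intro hG hk
      exact ⟨by rw [flatP_nil, List.take_zero], by rw [List.drop_zero],
        fun p hp => absurd hp List.not_mem_nil, hG⟩
  | case2 k hk0 =>
      intro hG hk
      rw [flatP_nil, List.length_nil] at hk
      omega
  | case3 k hk0 s lo hi rest hle r ih =>
      intro hG hk
      have hg : GoodP (s, lo, hi) := hG _ (by simp)
      have hlen : (pieceStr (s, lo, hi)).length = hi - lo := len_pieceStr _ hg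
      rw [flatP_cons, List.length_append, hlen] at hk
      have hG' : ∀ p ∈ rest, GoodP p := fun p hp => hG p (List.mem_cons_of_mem _ hp)
      obtain ⟨i1, i2, i3, i4⟩ := ih hG' (by omega)
      have ht : (pieceStr (s, lo, hi)).take k = pieceStr (s, lo, hi) :=
        List.take_of_length_le (by rw [hlen]; exact hle)
      have hd : (pieceStr (s, lo, hi)).drop k = [] :=
        List.drop_eq_nil_of_le (by rw [hlen]; exact hle)
      refine ⟨?_, ?_, ?_, i4⟩
      · rw [flatP_cons, flatP_cons, i1, List.take_append, ht, hlen]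
      · rw [i2, flatP_cons, List.drop_append, hd, hlen, List.nil_append]
      · intro p hp
        rcases List.mem_cons.mp hp with h | h
        · subst h; exact hg
        · exact i3 p h
  | case4 k hk0 s lo hi rest hgt =>
      intro hG hk
      have hg : GoodP (s, lo, hi) := hG _ (by simp)
      obtain ⟨hg1, hg2⟩ := hg
      simp only at hg1 hg2
      have hlen : (pieceStr (s, lo, hi)).length = hi - lo := len_pieceStr _ ⟨hg1, hg2⟩
      have hgHead : GoodP (s, lo, lo + k) :=
        ⟨by show lo ≤ lo + k; omega, by show lo + k ≤ s.length; omega⟩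
      have hgTail : GoodP (s, lo + k, hi) :=
        ⟨by show lo + k ≤ hi; omega, by show hi ≤ s.length; omega⟩
      refine ⟨?_, ?_, ?_, ?_⟩
      · rw [flatP_cons, flatP_nil, List.append_nil, flatP_cons, List.take_append,
          hlen, show k - (hi - lo) = 0 by omega, List.take_zero, List.append_nil]
        simp only [pieceStr]
        rw [List.take_take]
        congr 1
        omega
      · rw [flatP_cons, flatP_cons, List.drop_append, hlen,
          show k - (hi - lo) = 0 by omega, List.drop_zero, pieceStr_dropLow]
      · intro p hp
        rw [List.mem_singleton] at hp
        subst hp; exact hgHead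
      · intro p hp
        rcases List.mem_cons.mp hp with h | h
        · subst h; exact hgTail
        · exact hG p (List.mem_cons_of_mem _ h)

-- the state invariant tying B's piece table to A's string
def InvB (st : List PieceB × Nat × Int) (cs : List Char) (off : Int) : Prop :=
  flatP st.1 = cs ∧ st.2.1 = cs.length ∧ st.2.2 = off ∧ (∀ p ∈ st.1, GoodP p)

theorem stepB_inv (st : List PieceB × Nat × Int) (cs : List Char) (off : Int)
    (h : InvB st cs off) (ent : Int × Int × String) :
    InvB (stepB st ent) (stepA (cs, off) ent).1 (stepA (cs, off) ent).2 := by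
  obtain ⟨pieces, total, offv⟩ := st
  obtain ⟨hflat, htot, hoff, hG⟩ := h
  simp only at hflat htot hoff
  subst htot hoff
  set repl : List Char := '[' :: ent.2.2.toList ++ [']'] with hrepl
  set a := boundB (ent.1 + offv) cs.length with ha_def
  set b := boundB (ent.2.1 + offv) cs.length with hb_def
  have ha_le : a ≤ cs.length := boundB_le _ _
  have hb_le : b ≤ cs.length := boundB_le _ _
  have hA1 : (stepA (cs, offv) ent).1 = cs.take a ++ repl ++ cs.drop b := by
    simp only [stepA, slice_none_some, PySem.List.slice_some_none]
    rw [ha_def, hb_def, boundB_eq_clampIdx, boundB_eq_clampIdx]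
  have hlenflat : (flatP pieces).length = cs.length := by rw [hflat]
  obtain ⟨sa1, -, sa3, -⟩ := splitB_spec pieces a hG (by omega)
  obtain ⟨-, sb2, -, sb4⟩ := splitB_spec pieces b hG (by omega)
  have hstep : stepB (pieces, cs.length, offv) ent
      = ((splitB pieces a).1 ++ (repl, 0, repl.length) :: (splitB pieces b).2,
         a + repl.length + (cs.length - b),
         offv + (repl.length : Int) - (ent.2.1 - ent.1)) := rfl
  have hpiece : pieceStr (repl, 0, repl.length) = repl := by simp [pieceStr]
  rw [InvB, hstep]
  refine ⟨?_, ?_, rfl, ?_⟩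
  · show flatP _ = (stepA (cs, offv) ent).1
    rw [flatP_append, flatP_cons, hpiece, sa1, sb2, hflat, hA1]
    simp [List.append_assoc]
  · show a + repl.length + (cs.length - b) = (stepA (cs, offv) ent).1.length
    rw [hA1]
    simp only [List.length_append, List.length_take, List.length_drop]
    omega
  · intro p hp
    rcases List.mem_append.mp hp with h | h
    · exact sa3 p h
    · rcases List.mem_cons.mp h with hh | hh
      · subst hh; exact ⟨Nat.zero_le _, Nat.le_refl _⟩
      · exact sb4 p hh

theorem loop_inv (l : List (Int × Int × String)) :
    ∀ st cs off, InvB st cs off →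
      InvB (l.foldl stepB st) (l.foldl stepA (cs, off)).1 (l.foldl stepA (cs, off)).2 := by
  induction l with
  | nil => intro st cs off h; simpa using h
  | cons ent l ih =>
      intro st cs off h
      simp only [List.foldl_cons]
      have h1 := stepB_inv st cs off h ent
      have := ih (stepB st ent) (stepA (cs, off) ent).1 (stepA (cs, off) ent).2 h1
      simpa using this

-- ===== VERDICT (by name: the statement is the Claim_ definition above) =====
theorem redact_text_spec : Claim_equal_redact_text := by
  intro text pii _
  unfold Spec_redact_text redact_text redact_text_alt
  have h0 : InvB ([(text.toList, 0, text.toList.length)], text.toList.length, 0)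
      text.toList 0 := by
    refine ⟨?_, rfl, rfl, ?_⟩
    · rw [flatP_cons, flatP_nil, List.append_nil]
      simp [pieceStr]
    · intro p hp
      rw [List.mem_singleton] at hp
      subst hp; exact ⟨Nat.zero_le _, Nat.le_refl _⟩
  obtain ⟨hflat, -, -, -⟩ := loop_inv pii _ _ _ h0
  have hmap : ∀ (L : List PieceB), L.map pieceSlice = L.map pieceStr :=
    fun L => List.map_congr_left (fun p _ => pieceSlice_eq p)
  show _ = String.ofList _
  rw [← hflat]
  simp only [flatP, hmap]
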